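-- pv_equiv track=rewrite | github.com/justinsloan/henry | editor_functions.py | count_words_outside_header
-- ===== SOURCE A (Python) =====
-- def count_words_outside_header(text=""):
--     """Return a word count that does not include words that are in the Jekyll headers."""
--     lines = text.split('\n')
--     in_header = False
--     word_count = 0
--
--     for line in lines:
--         stripped_line = line.strip()
--         if stripped_line == "---":
--             in_header = not in_header
--             continue
--         if not in_header and stripped_line:
--             words = stripped_line.split()
--             word_count += len(words)
--
--     return word_count
-- ===== SOURCE B (Python) =====
-- def count_words_outside_header(text=""):
--     """Return a word count that does not include words in the Jekyll headers."""
--     segments = []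
--     current = []
--     for line in text.split('\n'):
--         if line.strip() == "---":
--             segments.append(current)
--             current = []
--         else:
--             current.append(line)
--     segments.append(current)
--     return sum(len(line.split())
--                for i, seg in enumerate(segments) if i % 2 == 0
--                for line in seg)
-- ===== Notes on version B (the rewrite author's own statement) =====
-- stated objective: alternative
-- what changed: Replaces the single toggle-flag line loop with a two-phase approach: first split the text into segments delimited by the Jekyll header marker lines, then sum word counts over the even-indexed (outside-header) segments.
import Mathlib
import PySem

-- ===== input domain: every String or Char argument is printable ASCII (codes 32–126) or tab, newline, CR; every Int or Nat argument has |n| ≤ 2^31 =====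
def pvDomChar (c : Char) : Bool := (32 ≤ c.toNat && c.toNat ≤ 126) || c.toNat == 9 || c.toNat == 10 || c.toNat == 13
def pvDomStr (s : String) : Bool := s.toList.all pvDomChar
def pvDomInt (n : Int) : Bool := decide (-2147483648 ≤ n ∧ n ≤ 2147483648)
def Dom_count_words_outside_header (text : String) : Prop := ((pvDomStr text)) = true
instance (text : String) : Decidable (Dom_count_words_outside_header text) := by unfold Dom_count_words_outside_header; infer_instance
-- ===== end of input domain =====

-- B replaces A's single toggle-flag loop by building the list of '---'-delimited segments
-- and then summing word counts over the even-indexed (outside-header) segments (objective: alternative).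

-- ===== PORT A =====
-- loop body of A's 'for line in lines' (text.split('\n') is Chars.splitOn with sep '\n', mapped back to String)
def cwohStepA (st : Bool × Int) (line : String) : Bool × Int :=
  let stripped := PySem.Str.strip line
  if stripped = "---" then (!st.1, st.2)
  else if st.1 = false ∧ ¬ stripped = "" then
    (st.1, st.2 + ((PySem.Str.split₀ stripped).length : Int))
  else st

def count_words_outside_header (text : String) : Int :=
  ((((PySem.Chars.splitOn text.toList ['\n']).map String.ofList)).foldl cwohStepA (false, 0)).2

-- ===== PORT B =====
-- len(line.split()) as an Int
def cwohWc (line : String) : Int := ((PySem.Str.split₀ line).length : Int)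

-- loop body of B's segment-building pass: state = (closed segments, current segment)
def cwohStepB (st : List (List String) × List String) (line : String) :
    List (List String) × List String :=
  if PySem.Str.strip line = "---" then (st.1 ++ [st.2], [])
  else (st.1, st.2 ++ [line])

def cwohOutsideSum (segments : List (List String)) : Int :=
  (((PySem.List.enumerate segments 0).filter (fun q => PySem.Int.mod q.1 2 == 0)).flatMap
      (fun q => q.2.map cwohWc)).sum

def count_words_outside_header_alt (text : String) : Int :=
  cwohOutsideSum
    ((((PySem.Chars.splitOn text.toList ['\n']).map String.ofList).foldl cwohStepB ([], [])).1 ++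
     [(((PySem.Chars.splitOn text.toList ['\n']).map String.ofList).foldl cwohStepB ([], [])).2])

-- ===== PRECONDITION & SPEC =====
def Spec_count_words_outside_header (text : String) (out : Int) : Prop := out = count_words_outside_header_alt text
instance (text : String) (out : Int) : Decidable (Spec_count_words_outside_header text out) := by unfold Spec_count_words_outside_header; infer_instance

-- ===== CLAIM (what is proved, stated in full; the proofs are below) =====
def Claim_equal_count_words_outside_header : Prop := ∀ (text : String), Dom_count_words_outside_header text → Spec_count_words_outside_header text (count_words_outside_header text)

-- ===== LEMMAS AND PROOFS =====

-- word count of a segment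
def cwohSegwc (seg : List String) : Int := (seg.map cwohWc).sum

-- alternating (even-index) segment sum
def cwohAltsum : List (List String) → Int
  | [] => 0
  | [s] => cwohSegwc s
  | s :: _ :: rest => cwohSegwc s + cwohAltsum rest

theorem cwohAltsum_cons (s : List String) (rest : List (List String)) :
    cwohAltsum (s :: rest) = cwohSegwc s + cwohAltsum rest.tail := by
  cases rest <;> simp [cwohAltsum]

theorem cwoh_go_all_ws (ws : List Char) (h : ∀ c ∈ ws, PySem.Chars.isspace c = true)
    (cur : List Char) (acc : List (List Char)) :
    PySem.Chars.split₀.go ws cur acc =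
      (if cur.isEmpty then acc.reverse else (cur.reverse :: acc).reverse) := by
  induction ws generalizing cur acc with
  | nil => simp [PySem.Chars.split₀.go]
  | cons c rest ih =>
    have hc : PySem.Chars.isspace c = true := h c (by simp)
    have hrest : ∀ c ∈ rest, PySem.Chars.isspace c = true := fun x hx => h x (by simp [hx])
    by_cases hcur : cur.isEmpty
    · simp [PySem.Chars.split₀.go, hc, hcur, ih hrest]
    · simp [PySem.Chars.split₀.go, hc, hcur, ih hrest]

theorem cwoh_go_append_ws (s ws : List Char) (h : ∀ c ∈ ws, PySem.Chars.isspace c = true) :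
    ∀ (cur : List Char) (acc : List (List Char)),
      PySem.Chars.split₀.go (s ++ ws) cur acc = PySem.Chars.split₀.go s cur acc := by
  induction s with
  | nil =>
    intro cur acc
    rw [List.nil_append, cwoh_go_all_ws ws h]
    simp [PySem.Chars.split₀.go]
  | cons c rest ih =>
    intro cur acc
    by_cases hc : PySem.Chars.isspace c = true
    · by_cases hcur : cur.isEmpty
      · simp [PySem.Chars.split₀.go, hc, hcur, ih]
      · simp [PySem.Chars.split₀.go, hc, hcur, ih]
    · simp [PySem.Chars.split₀.go, hc, ih]

theorem cwoh_split₀_lstrip (s : List Char) :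
    PySem.Chars.split₀ (PySem.Chars.lstrip s) = PySem.Chars.split₀ s := by
  unfold PySem.Chars.split₀ PySem.Chars.lstrip
  induction s with
  | nil => simp
  | cons c rest ih =>
    by_cases hc : PySem.Chars.isspace c = true
    · simpa [List.dropWhile_cons, hc, PySem.Chars.split₀.go] using ih
    · simp [hc]

theorem cwoh_split₀_strip (s : List Char) :
    PySem.Chars.split₀ (PySem.Chars.strip s) = PySem.Chars.split₀ s := by
  unfold PySem.Chars.strip
  set u := PySem.Chars.lstrip s with hu
  have hdecomp : u = PySem.Chars.rstrip u ++ (List.takeWhile PySem.Chars.isspace u.reverse).reverse := by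
    unfold PySem.Chars.rstrip
    conv_lhs => rw [← List.reverse_reverse u,
      ← List.takeWhile_append_dropWhile (p := PySem.Chars.isspace) (l := u.reverse)]
    rw [List.reverse_append]
  have hws : ∀ c ∈ (List.takeWhile PySem.Chars.isspace u.reverse).reverse,
      PySem.Chars.isspace c = true := by
    intro c hc
    exact List.mem_takeWhile_imp (List.mem_reverse.mp hc)
  have h1 : PySem.Chars.split₀ u = PySem.Chars.split₀ (PySem.Chars.rstrip u) := by
    unfold PySem.Chars.split₀
    conv_lhs => rw [hdecomp]
    exact cwoh_go_append_ws _ _ hws [] []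
  rw [← h1, hu, cwoh_split₀_lstrip]

theorem cwoh_len_split₀_strip (line : String) :
    (PySem.Str.split₀ (PySem.Str.strip line)).length = (PySem.Str.split₀ line).length := by
  have h1 := congrArg List.length (PySem.Str.split₀_map_toList (PySem.Str.strip line))
  have h2 := congrArg List.length (PySem.Str.split₀_map_toList line)
  rw [List.length_map] at h1 h2
  rw [h1, h2, PySem.Str.toList_strip, cwoh_split₀_strip]

theorem cwohWc_strip (line : String) :
    ((PySem.Str.split₀ (PySem.Str.strip line)).length : Int) = cwohWc line := by
  simp [cwohWc, cwoh_len_split₀_strip]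

theorem cwohWc_of_strip_empty (line : String) (h : PySem.Str.strip line = "") :
    cwohWc line = 0 := by
  rw [cwohWc, ← cwoh_len_split₀_strip, h]
  decide

theorem cwohSegwc_nil : cwohSegwc [] = 0 := by simp [cwohSegwc]

theorem cwohSegwc_snoc (seg : List String) (line : String) :
    cwohSegwc (seg ++ [line]) = cwohSegwc seg + cwohWc line := by
  simp [cwohSegwc]

theorem cwohAltsum_append_nil (xs : List (List String)) :
    cwohAltsum (xs ++ [[]]) = cwohAltsum xs := by
  induction xs using cwohAltsum.induct with
  | case1 => simp [cwohAltsum, cwohSegwc_nil]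
  | case2 s => simp [cwohAltsum]
  | case3 s t rest ih => simp [cwohAltsum, ih]

theorem cwohAltsum_snoc_last (segs : List (List String)) (cur : List String) (line : String) :
    cwohAltsum (segs ++ [cur ++ [line]]) =
      cwohAltsum (segs ++ [cur]) + (if segs.length % 2 = 0 then cwohWc line else 0) := by
  induction segs using cwohAltsum.induct with
  | case1 => simp [cwohAltsum, cwohSegwc_snoc]
  | case2 s => simp [cwohAltsum]
  | case3 s t rest ih =>
    simp only [List.cons_append, cwohAltsum, ih, List.length_cons]
    have h2 : (rest.length + 1 + 1) % 2 = rest.length % 2 := by omega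
    simp only [h2]; ring

-- B's enumerate/filter/flatMap sum is the alternating segment sum
theorem cwoh_enum_sum (segs : List (List String)) : ∀ (n : Int),
    (((PySem.List.enumerate segs n).filter (fun q => PySem.Int.mod q.1 2 == 0)).flatMap
        (fun q => q.2.map cwohWc)).sum
      = (if n % 2 = 0 then cwohAltsum segs else cwohAltsum segs.tail) := by
  induction segs with
  | nil => intro n; simp [PySem.List.enumerate_nil, cwohAltsum]
  | cons s rest ih =>
    intro n
    rw [PySem.List.enumerate_cons]
    by_cases hn : n % 2 = 0
    · have hn1 : ¬ (n + 1) % 2 = 0 := by omega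
      rw [List.filter_cons_of_pos (by simp [hn]), List.flatMap_cons,
        List.sum_append, ih (n + 1), if_neg hn1, if_pos hn, cwohAltsum_cons]
      simp [cwohSegwc]
    · have hn1 : (n + 1) % 2 = 0 := by omega
      rw [List.filter_cons_of_neg (by simp [hn]), ih (n + 1), if_pos hn1, if_neg hn]
      simp

-- main loop invariant: A's running count is the alternating sum of B's segments so far
theorem cwoh_loop (lines : List String) :
    ∀ (segs : List (List String)) (cur : List String),
    (lines.foldl cwohStepA (decide (segs.length % 2 = 1), cwohAltsum (segs ++ [cur]))).2
      = cwohAltsum ((lines.foldl cwohStepB (segs, cur)).1 ++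
                    [(lines.foldl cwohStepB (segs, cur)).2]) := by
  induction lines with
  | nil => intro segs cur; simp
  | cons line rest ih =>
    intro segs cur
    by_cases hmark : PySem.Str.strip line = "---"
    · have hA : cwohStepA (decide (segs.length % 2 = 1), cwohAltsum (segs ++ [cur])) line
          = (!decide (segs.length % 2 = 1), cwohAltsum (segs ++ [cur])) := by
        simp [cwohStepA, hmark]
      have hB : cwohStepB (segs, cur) line = (segs ++ [cur], []) := by
        simp [cwohStepB, hmark]
      have hpar : (!decide (segs.length % 2 = 1)) = decide ((segs ++ [cur]).length % 2 = 1) := by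
        simp only [List.length_append, List.length_cons, List.length_nil]
        by_cases h : segs.length % 2 = 1
        · have h2 : ¬ (segs.length + 1) % 2 = 1 := by omega
          simp [h, h2]
        · have h2 : (segs.length + 1) % 2 = 1 := by omega
          simp [h, h2]
      have hcnt : cwohAltsum (segs ++ [cur]) = cwohAltsum ((segs ++ [cur]) ++ [[]]) := by
        rw [cwohAltsum_append_nil]
      rw [List.foldl_cons, List.foldl_cons, hA, hB, hpar, hcnt, ih]
    · have hB : cwohStepB (segs, cur) line = (segs, cur ++ [line]) := by
        simp only [cwohStepB]
        rw [if_neg hmark]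
      have key : cwohStepA (decide (segs.length % 2 = 1), cwohAltsum (segs ++ [cur])) line
          = (decide (segs.length % 2 = 1), cwohAltsum (segs ++ [cur ++ [line]])) := by
        rw [cwohAltsum_snoc_last]
        simp only [cwohStepA]
        rw [if_neg hmark]
        split_ifs with h1 h2
        · rw [cwohWc_strip]
        · rcases h1 with ⟨hd, _⟩
          rw [decide_eq_false_iff_not] at hd
          omega
        · rw [Classical.not_and_iff_not_or_not, decide_eq_false_iff_not, not_not, not_not] at h1
          rcases h1 with hd | hemp
          · omega
          · rw [cwohWc_of_strip_empty line hemp, add_zero]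
        · rw [add_zero]
      rw [List.foldl_cons, List.foldl_cons, key, hB, ih]

-- ===== VERDICT (by name: the statement is the Claim_ definition above) =====
theorem count_words_outside_header_spec : Claim_equal_count_words_outside_header := by
  intro text _
  unfold Spec_count_words_outside_header count_words_outside_header count_words_outside_header_alt
    cwohOutsideSum
  have h0 := cwoh_loop ((PySem.Chars.splitOn text.toList ['\n']).map String.ofList) [] []
  rw [show ((decide ((([]:List (List String))).length % 2 = 1),
        cwohAltsum (([]:List (List String)) ++ [[]]))) = ((false, 0) : Bool × Int) from by decide]
    at h0
  rw [h0, cwoh_enum_sum]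
  norm_num
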